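-- pv_equiv track=rewrite | github.com/sws121-max/astro_mart | new.py | generate_friendship_rules
-- ===== SOURCE A (Python) =====
-- def generate_friendship_rules(planetary_positions):
--     # Initialize friendship dynamics
--     friendships = {
--         "five_fold_friendship": {},
--         "permanent_table": {},
--         "temporary_friendship": {}
--     }
--
--     # Define basic relationships based on astrological principles
--     for planet, position in planetary_positions.items():
--         # Initialize each planet's friendship data
--         friendships["five_fold_friendship"][planet] = {
--             "BitterEnemy": [],
--             "Enemies": [],
--             "Friends": [],
--             "IntimateFriend": [],
--             "Neutral": []
--         }
--
--         friendships["permanent_table"][planet] = {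
--             "Enemies": [],
--             "Friends": [],
--             "Neutral": []
--         }
--
--         friendships["temporary_friendship"][planet] = {
--             "Enemies": [],
--             "Friends": []
--         }
--
--         # Determine relationships dynamically based on positions
--         for other_planet, other_position in planetary_positions.items():
--             if planet == other_planet:
--                 continue  # Skip self comparison
--
--             degree_difference = abs(position - other_position) % 360
--
--             # Define friendship and enmity rules based on degree differences
--             if degree_difference < 30 or degree_difference > 330:  # Close in zodiac
--                 friendships["five_fold_friendship"][planet]["Friends"].append(other_planet)
--                 friendships["permanent_table"][planet]["Friends"].append(other_planet)
--                 friendships["temporary_friendship"][planet]["Friends"].append(other_planet)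
--             elif 30 <= degree_difference < 90:  # Neutral
--                 friendships["five_fold_friendship"][planet]["Neutral"].append(other_planet)
--                 friendships["permanent_table"][planet]["Neutral"].append(other_planet)
--             elif 90 <= degree_difference < 150:  # Enemies
--                 friendships["five_fold_friendship"][planet]["Enemies"].append(other_planet)
--                 friendships["permanent_table"][planet]["Enemies"].append(other_planet)
--             elif 150 <= degree_difference < 210:  # Bitter enemies
--                 friendships["five_fold_friendship"][planet]["BitterEnemy"].append(other_planet)
--
--             # Example condition for intimate friends
--             if degree_difference < 10:  # Very close in zodiac
--                 friendships["five_fold_friendship"][planet]["IntimateFriend"].append(other_planet)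
--
--     return friendships
-- ===== SOURCE B (Python) =====
-- def _classify(d):
--     # single category of a pair plus the intimate flag, same thresholds as the spec
--     if d < 30 or d > 330:
--         cat = "Friends"
--     elif d < 90:
--         cat = "Neutral"
--     elif d < 150:
--         cat = "Enemies"
--     elif d < 210:
--         cat = "BitterEnemy"
--     else:
--         cat = None
--     return cat, d < 10
--
--
-- def _apply(record, name, cat, intimate):
--     if cat is not None:
--         record[cat].append(name)
--     if intimate:
--         record["IntimateFriend"].append(name)
--
--
-- def generate_friendship_rules(planetary_positions):
--     # |a-b| is symmetric, so the relation of each unordered pair is classified ONCE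
--     # in a triangular half-matrix pass and applied to both planets' records; the
--     # permanent and temporary tables are projections copied out afterwards.
--     items = list(planetary_positions.items())
--     rows = {p: {"BitterEnemy": [], "Enemies": [], "Friends": [],
--                 "IntimateFriend": [], "Neutral": []} for p, _ in items}
--     remaining = items
--     while remaining:
--         (p, pos), remaining = remaining[0], remaining[1:]
--         for q, qpos in remaining:
--             cat, intimate = _classify(abs(pos - qpos) % 360)
--             _apply(rows[p], q, cat, intimate)
--             _apply(rows[q], p, cat, intimate)
--     permanent = {p: {"Enemies": list(r["Enemies"]), "Friends": list(r["Friends"]),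
--                      "Neutral": list(r["Neutral"])} for p, r in rows.items()}
--     temporary = {p: {"Enemies": [], "Friends": list(r["Friends"])} for p, r in rows.items()}
--     return {
--         "five_fold_friendship": rows,
--         "permanent_table": permanent,
--         "temporary_friendship": temporary
--     }
-- ===== Notes on version B (the rewrite author's own statement) =====
-- stated objective: alternative
-- what changed: B exploits the symmetry of abs(a-b)%360: it classifies each unordered pair exactly once in a triangular half-matrix pass (popping the head of a shrinking 'remaining' list) and applies the result to both planets' records, instead of A's full n*(n-1) per-row rescan; the permanent and temporary tables are projections copied out of the five-fold table afterwards.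
import Mathlib
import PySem

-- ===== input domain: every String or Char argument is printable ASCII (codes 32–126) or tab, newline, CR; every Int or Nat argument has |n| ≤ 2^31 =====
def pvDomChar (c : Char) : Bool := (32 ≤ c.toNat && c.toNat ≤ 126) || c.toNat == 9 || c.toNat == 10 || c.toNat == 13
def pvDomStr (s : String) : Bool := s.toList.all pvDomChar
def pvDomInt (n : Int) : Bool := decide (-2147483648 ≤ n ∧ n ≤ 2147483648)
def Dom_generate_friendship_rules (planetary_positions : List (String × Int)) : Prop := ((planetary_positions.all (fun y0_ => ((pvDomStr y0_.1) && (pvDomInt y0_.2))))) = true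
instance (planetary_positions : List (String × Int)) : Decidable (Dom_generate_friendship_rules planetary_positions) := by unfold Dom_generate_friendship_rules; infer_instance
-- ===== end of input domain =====

-- B classifies each unordered pair once (|a-b| is symmetric) in a triangular pass over a
-- shrinking 'remaining' list, applying the result to both planets' records, and derives the
-- permanent/temporary tables from the five-fold table afterwards (objective: alternative).

-- ===== PORT A =====
-- A's inner-loop state: the nine lists A appends to while scanning the other planets:
-- (BitterEnemy, Enemies, Friends, IntimateFriend, Neutral,  perm.Enemies, perm.Friends, perm.Neutral,  temp.Friends)
def pvStA : Type := List String × List String × List String × List String × List String ×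
  List String × List String × List String × List String

-- one iteration of A's inner loop (all three tables updated together, branches in A's order)
def pvStepA (planet : String) (position : Int) (st : pvStA) (op : String × Int) : pvStA :=
  match st with
  | (be, en, fr, inf, ne, pEn, pFr, pNe, tFr) =>
    if planet == op.1 then (be, en, fr, inf, ne, pEn, pFr, pNe, tFr)  -- continue
    else
      let d := PySem.Int.mod |position - op.2| 360
      let st1 : pvStA :=
        if d < 30 ∨ d > 330 then (be, en, fr ++ [op.1], inf, ne, pEn, pFr ++ [op.1], pNe, tFr ++ [op.1])
        else if 30 ≤ d ∧ d < 90 then (be, en, fr, inf, ne ++ [op.1], pEn, pFr, pNe ++ [op.1], tFr)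
        else if 90 ≤ d ∧ d < 150 then (be, en ++ [op.1], fr, inf, ne, pEn ++ [op.1], pFr, pNe, tFr)
        else if 150 ≤ d ∧ d < 210 then (be ++ [op.1], en, fr, inf, ne, pEn, pFr, pNe, tFr)
        else (be, en, fr, inf, ne, pEn, pFr, pNe, tFr)
      match st1 with
      | (be1, en1, fr1, inf1, ne1, pEn1, pFr1, pNe1, tFr1) =>
        if d < 10 then (be1, en1, fr1, inf1 ++ [op.1], ne1, pEn1, pFr1, pNe1, tFr1)
        else (be1, en1, fr1, inf1, ne1, pEn1, pFr1, pNe1, tFr1)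

def pvRowA (planet : String) (position : Int) (pps : List (String × Int)) : pvStA :=
  pps.foldl (pvStepA planet position) ([], [], [], [], [], [], [], [], [])

def generate_friendship_rules (planetary_positions : List (String × Int)) :
    List (String × List (String × List (String × List String))) :=
  let tables :=
    planetary_positions.foldl
      (fun (acc : List (String × List (String × List String)) ×
                  List (String × List (String × List String)) ×
                  List (String × List (String × List String))) pp =>
        match pvRowA pp.1 pp.2 planetary_positions, acc with
        | (be, en, fr, inf, ne, pEn, pFr, pNe, tFr), (five, perm, temp) =>
          (five ++ [(pp.1, [("BitterEnemy", be), ("Enemies", en), ("Friends", fr),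
                            ("IntimateFriend", inf), ("Neutral", ne)])],
           perm ++ [(pp.1, [("Enemies", pEn), ("Friends", pFr), ("Neutral", pNe)])],
           temp ++ [(pp.1, [("Enemies", ([] : List String)), ("Friends", tFr)])]))
      ([], [], [])
  [("five_fold_friendship", tables.1), ("permanent_table", tables.2.1),
   ("temporary_friendship", tables.2.2)]

-- ===== PORT B =====
-- a planet's five-fold record: (BitterEnemy, Enemies, Friends, IntimateFriend, Neutral)
def pvRec : Type := List String × List String × List String × List String × List String

def pvEmptyRec : pvRec := ([], [], [], [], [])

-- '_classify' in Source B: the single category of a pair plus the intimate flag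
def pvClassify (d : Int) : Option String × Bool :=
  (if d < 30 ∨ d > 330 then some "Friends"
   else if d < 90 then some "Neutral"
   else if d < 150 then some "Enemies"
   else if d < 210 then some "BitterEnemy"
   else none,
   decide (d < 10))

-- '_apply' in Source B
def pvApply (nm : String) (cat : Option String) (intim : Bool) (st : pvRec) : pvRec :=
  match st with
  | (be, en, fr, inf, ne) =>
    let st1 : pvRec :=
      match cat with
      | some c =>
        if c == "Friends" then (be, en, fr ++ [nm], inf, ne)
        else if c == "Neutral" then (be, en, fr, inf, ne ++ [nm])
        else if c == "Enemies" then (be, en ++ [nm], fr, inf, ne)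
        else (be ++ [nm], en, fr, inf, ne)
      | none => (be, en, fr, inf, ne)
    match st1 with
    | (be1, en1, fr1, inf1, ne1) =>
      if intim then (be1, en1, fr1, inf1 ++ [nm], ne1) else (be1, en1, fr1, inf1, ne1)

-- body of Source B's inner 'for q, qpos in remaining' loop: classify once, apply to both rows
def pvInner (p : String × Int) (rows : PySem.Dict String pvRec) (q : String × Int) :
    PySem.Dict String pvRec :=
  let c := pvClassify (PySem.Int.mod |p.2 - q.2| 360)
  (rows.modify p.1 pvEmptyRec (pvApply q.1 c.1 c.2)).modify q.1 pvEmptyRec (pvApply p.1 c.1 c.2)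

-- Source B's 'while remaining' loop: pop the head, pair it with every later planet
def pvOuter : PySem.Dict String pvRec → List (String × Int) → PySem.Dict String pvRec
  | rows, [] => rows
  | rows, p :: remaining => pvOuter (remaining.foldl (pvInner p) rows) remaining

def pvRenderFive (st : pvRec) : List (String × List String) :=
  match st with
  | (be, en, fr, inf, ne) =>
    [("BitterEnemy", be), ("Enemies", en), ("Friends", fr), ("IntimateFriend", inf), ("Neutral", ne)]

-- Source B's 'rows' after the triangular pass: initial dict of empty records, then the while loop
def pvRows (planetary_positions : List (String × Int)) : PySem.Dict String pvRec :=
  pvOuter (planetary_positions.foldl (fun d pp => d.insert pp.1 pvEmptyRec) PySem.Dict.empty)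
    planetary_positions

def generate_friendship_rules_alt (planetary_positions : List (String × Int)) :
    List (String × List (String × List (String × List String))) :=
  [("five_fold_friendship",
    (pvRows planetary_positions).items.map (fun pr => (pr.1, pvRenderFive pr.2))),
   ("permanent_table",
    (pvRows planetary_positions).items.map (fun pr =>
      (pr.1, [("Enemies", pr.2.2.1), ("Friends", pr.2.2.2.1), ("Neutral", pr.2.2.2.2.2)]))),
   ("temporary_friendship",
    (pvRows planetary_positions).items.map (fun pr =>
      (pr.1, [("Enemies", ([] : List String)), ("Friends", pr.2.2.2.1)])))]

-- ===== PRECONDITION & SPEC =====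
-- Pre_ excludes lists with duplicate planet names: A's dict argument collapses duplicate keys
-- (last value wins), so such an association list does not represent the dict A iterates over.
def Pre_generate_friendship_rules (planetary_positions : List (String × Int)) : Prop :=
  (planetary_positions.map Prod.fst).Nodup
instance (planetary_positions : List (String × Int)) : Decidable (Pre_generate_friendship_rules planetary_positions) := by unfold Pre_generate_friendship_rules; infer_instance

def pvWitness_generate_friendship_rules : (List (String × Int)) := [("Sun", 10), ("Moon", 50)]

def Spec_generate_friendship_rules (planetary_positions : List (String × Int)) (out : List (String × List (String × List (String × List String)))) : Prop := out = generate_friendship_rules_alt planetary_positions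
instance (planetary_positions : List (String × Int)) (out : List (String × List (String × List (String × List String)))) : Decidable (Spec_generate_friendship_rules planetary_positions out) := by unfold Spec_generate_friendship_rules; infer_instance

-- ===== CLAIM =====
def Claim_equal_generate_friendship_rules : Prop := ∀ (planetary_positions : List (String × Int)), Dom_generate_friendship_rules planetary_positions → Pre_generate_friendship_rules planetary_positions → Spec_generate_friendship_rules planetary_positions (generate_friendship_rules planetary_positions)

-- ===== LEMMAS AND PROOFS =====
-- proof-side row function: what one planet's five-fold record is, as a single left-to-right
-- scan of all planets (self skipped); A reduces to it via pvEmb, B via the triangular invariant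
def pvApplyFrom (p : String × Int) (st : pvRec) (q : String × Int) : pvRec :=
  let c := pvClassify (PySem.Int.mod |p.2 - q.2| 360)
  pvApply q.1 c.1 c.2 st

def pvStepB (planet : String) (position : Int) (st : pvRec) (op : String × Int) : pvRec :=
  if planet == op.1 then st else pvApplyFrom (planet, position) st op

def pvRowB (planet : String) (position : Int) (pps : List (String × Int)) : pvRec :=
  pps.foldl (pvStepB planet position) pvEmptyRec

-- embed B's 5-list record into A's 9-list state (perm.Enemies = en, perm.Friends = fr,
-- perm.Neutral = ne, temp.Friends = fr: A appends to them in the same branches)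
def pvEmb (st : pvRec) : pvStA :=
  match st with
  | (be, en, fr, inf, ne) => (be, en, fr, inf, ne, en, fr, ne, fr)

theorem pvStep_emb (planet : String) (position : Int) (st : pvRec) (op : String × Int) :
    pvStepA planet position (pvEmb st) op = pvEmb (pvStepB planet position st op) := by
  obtain ⟨be, en, fr, inf, ne⟩ := st
  simp only [pvStepA, pvStepB, pvApplyFrom, pvApply, pvClassify, pvEmb]
  by_cases h : planet = op.1
  · simp [h]
  · simp only [beq_iff_eq, h, if_false]
    set d := PySem.Int.mod |position - op.2| 360 with hd
    by_cases h1 : d < 30 ∨ d > 330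
    · by_cases hx : d < 10 <;> simp [h1, hx]
    · simp only [h1, if_false]
      by_cases h2 : d < 90
      · have : 30 ≤ d ∧ d < 90 := by omega
        by_cases hx : d < 10 <;> simp [h2, this, hx]
      · simp only [h2, if_false]
        by_cases h3 : d < 150
        · have : 90 ≤ d ∧ d < 150 := by omega
          by_cases hx : d < 10 <;> simp [h3, this, hx]
        · simp only [h3, if_false]
          by_cases h4 : d < 210
          · have : 150 ≤ d ∧ d < 210 := by omega
            by_cases hx : d < 10 <;> simp [h4, this, hx]
          · have h10 : ¬ d < 10 := by omega
            simp [h4, h10]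

theorem pvFold_emb (planet : String) (position : Int) (l : List (String × Int)) (st : pvRec) :
    l.foldl (pvStepA planet position) (pvEmb st) = pvEmb (l.foldl (pvStepB planet position) st) := by
  induction l generalizing st with
  | nil => rfl
  | cons x xs ih => simp only [List.foldl_cons, pvStep_emb, ih]

theorem pvRow_emb (planet : String) (position : Int) (pps : List (String × Int)) :
    pvRowA planet position pps = pvEmb (pvRowB planet position pps) := by
  simpa using pvFold_emb planet position pps ([], [], [], [], [])

-- A's outer accumulating fold is the triple of maps over the planets
theorem pvFoldA_eq_maps (pps l : List (String × Int))
    (five perm temp : List (String × List (String × List String))) :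
    l.foldl
      (fun acc pp =>
        match pvRowA pp.1 pp.2 pps, acc with
        | (be, en, fr, inf, ne, pEn, pFr, pNe, tFr), (five, perm, temp) =>
          (five ++ [(pp.1, [("BitterEnemy", be), ("Enemies", en), ("Friends", fr),
                            ("IntimateFriend", inf), ("Neutral", ne)])],
           perm ++ [(pp.1, [("Enemies", pEn), ("Friends", pFr), ("Neutral", pNe)])],
           temp ++ [(pp.1, [("Enemies", ([] : List String)), ("Friends", tFr)])]))
      (five, perm, temp)
    = (five ++ l.map (fun pp =>
         match pvRowA pp.1 pp.2 pps with
         | (be, en, fr, inf, ne, _, _, _, _) =>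
           (pp.1, [("BitterEnemy", be), ("Enemies", en), ("Friends", fr),
                   ("IntimateFriend", inf), ("Neutral", ne)])),
       perm ++ l.map (fun pp =>
         match pvRowA pp.1 pp.2 pps with
         | (_, _, _, _, _, pEn, pFr, pNe, _) =>
           (pp.1, [("Enemies", pEn), ("Friends", pFr), ("Neutral", pNe)])),
       temp ++ l.map (fun pp =>
         match pvRowA pp.1 pp.2 pps with
         | (_, _, _, _, _, _, _, _, tFr) =>
           (pp.1, [("Enemies", ([] : List String)), ("Friends", tFr)]))) := by
  induction l generalizing five perm temp with
  | nil => simp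
  | cons x xs ih =>
    simp only [List.foldl_cons, List.map_cons]
    obtain ⟨be, en, fr, inf, ne, pEn, pFr, pNe, tFr⟩ := pvRowA x.1 x.2 pps
    rw [ih]
    simp

-- ===== the triangular-fill invariant for B =====
-- the per-planet spec of what pvOuter leaves behind, aligned positionally with 'rest'
def pvSpecVals (s : (String × Int) → pvRec) : List (String × Int) → List pvRec
  | [] => []
  | p :: r => (r.foldl (pvApplyFrom p) (s p)) :: pvSpecVals (fun q => pvApplyFrom q (s q) p) r

theorem pvSpecVals_congr (s s' : (String × Int) → pvRec) (l : List (String × Int))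
    (h : ∀ q ∈ l, s q = s' q) : pvSpecVals s l = pvSpecVals s' l := by
  induction l generalizing s s' with
  | nil => rfl
  | cons p r ih =>
    simp only [pvSpecVals, h p (by simp)]
    rw [ih _ _ (fun q hq => by rw [h q (by simp [hq])])]

-- symmetry of the pair classification
theorem pvApplyFrom_symm (p q : String × Int) (st : pvRec) :
    pvApply p.1 (pvClassify (PySem.Int.mod |p.2 - q.2| 360)).1
      (pvClassify (PySem.Int.mod |p.2 - q.2| 360)).2 st = pvApplyFrom q st p := by
  simp only [pvApplyFrom, abs_sub_comm p.2 q.2]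

-- the inner loop of head p over the tail r
theorem pvInner_fold (p : String × Int) (r : List (String × Int))
    (rows : PySem.Dict String pvRec)
    (hp : p.1 ∉ r.map Prod.fst) (hnd : (r.map Prod.fst).Nodup)
    (hkp : p.1 ∈ rows.keys) (hkr : ∀ q ∈ r, q.1 ∈ rows.keys) :
    (r.foldl (pvInner p) rows).keys = rows.keys ∧
    (r.foldl (pvInner p) rows).getD p.1 pvEmptyRec
      = r.foldl (pvApplyFrom p) (rows.getD p.1 pvEmptyRec) ∧
    (∀ q ∈ r, (r.foldl (pvInner p) rows).getD q.1 pvEmptyRec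
      = pvApplyFrom q (rows.getD q.1 pvEmptyRec) p) ∧
    (∀ k, k ≠ p.1 → k ∉ r.map Prod.fst →
      (r.foldl (pvInner p) rows).getD k pvEmptyRec = rows.getD k pvEmptyRec) := by
  induction r generalizing rows with
  | nil => exact ⟨rfl, rfl, by simp, fun k _ _ => rfl⟩
  | cons q0 r' ih =>
    have hp' : p.1 ≠ q0.1 ∧ p.1 ∉ r'.map Prod.fst := by
      simp only [List.map_cons, List.mem_cons, not_or] at hp; exact hp
    have hnd'' : q0.1 ∉ r'.map Prod.fst ∧ (r'.map Prod.fst).Nodup := by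
      simp only [List.map_cons, List.nodup_cons] at hnd; exact hnd
    have hpq0 : p.1 ≠ q0.1 := hp'.1
    have hq0r' : q0.1 ∉ r'.map Prod.fst := hnd''.1
    have hpr' : p.1 ∉ r'.map Prod.fst := hp'.2
    have hnd' : (r'.map Prod.fst).Nodup := hnd''.2
    have hcontp : rows.contains p.1 = true := (PySem.Dict.contains_iff_mem_keys _ _).2 hkp
    have hcontq0 : rows.contains q0.1 = true :=
      (PySem.Dict.contains_iff_mem_keys _ _).2 (hkr q0 (by simp))
    -- the state after processing q0
    set rows1 := pvInner p rows q0 with hrows1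
    have hk1 : rows1.keys = rows.keys := by
      rw [hrows1]
      simp only [pvInner]
      rw [PySem.Dict.keys_modify, PySem.Dict.keys_insert_of_contains _ _
            (by rw [PySem.Dict.contains_modify]; simp [hcontq0]),
          PySem.Dict.keys_modify, PySem.Dict.keys_insert_of_contains _ _ hcontp]
    have hg1p : rows1.getD p.1 pvEmptyRec = pvApplyFrom p (rows.getD p.1 pvEmptyRec) q0 := by
      rw [hrows1]
      simp only [pvInner]
      rw [PySem.Dict.getD_modify_of_ne _ _ _ hpq0, PySem.Dict.getD_modify_self]
      rfl
    have hg1q0 : rows1.getD q0.1 pvEmptyRec = pvApplyFrom q0 (rows.getD q0.1 pvEmptyRec) p := by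
      rw [hrows1]
      simp only [pvInner]
      rw [PySem.Dict.getD_modify_self, PySem.Dict.getD_modify_of_ne _ _ _ (Ne.symm hpq0)]
      exact pvApplyFrom_symm p q0 _
    have hg1other : ∀ k, k ≠ p.1 → k ≠ q0.1 → rows1.getD k pvEmptyRec = rows.getD k pvEmptyRec := by
      intro k hk1' hk2
      rw [hrows1]
      simp only [pvInner]
      rw [PySem.Dict.getD_modify_of_ne _ _ _ hk2, PySem.Dict.getD_modify_of_ne _ _ _ hk1']
    have ihres := ih rows1 hpr' hnd' (hk1 ▸ hkp) (fun q hq => hk1 ▸ hkr q (by simp [hq]))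
    obtain ⟨ihk, ihp, ihq, ihother⟩ := ihres
    refine ⟨?_, ?_, ?_, ?_⟩
    · simpa [List.foldl_cons, hk1] using ihk
    · simp only [List.foldl_cons]
      rw [ihp, hg1p]
    · intro q hq
      rcases List.mem_cons.1 hq with h | h
      · subst h
        simp only [List.foldl_cons]
        rw [ihother q.1 (Ne.symm hpq0) hq0r', hg1q0]
      · simp only [List.foldl_cons]
        have hq1p : q.1 ≠ p.1 := by
          intro e; exact hpr' (e ▸ List.mem_map_of_mem h)
        have hq1q0 : q.1 ≠ q0.1 := by
          intro e; exact hq0r' (e ▸ List.mem_map_of_mem h)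
        rw [ihq q h, hg1other q.1 hq1p hq1q0]
    · intro k hk hkr'
      have hkr'' : k ≠ q0.1 ∧ k ∉ r'.map Prod.fst := by
        simp only [List.map_cons, List.mem_cons, not_or] at hkr'; exact hkr'
      simp only [List.foldl_cons]
      rw [ihother k hk hkr''.2, hg1other k hk hkr''.1]

-- the outer loop: positional characterisation of every planet's final record
theorem pvOuter_spec (rest : List (String × Int)) (rows : PySem.Dict String pvRec)
    (hnd : (rest.map Prod.fst).Nodup) (hk : ∀ q ∈ rest, q.1 ∈ rows.keys) :
    (pvOuter rows rest).keys = rows.keys ∧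
    (∀ k, k ∉ rest.map Prod.fst →
      (pvOuter rows rest).getD k pvEmptyRec = rows.getD k pvEmptyRec) ∧
    rest.map (fun q => (pvOuter rows rest).getD q.1 pvEmptyRec)
      = pvSpecVals (fun q => rows.getD q.1 pvEmptyRec) rest := by
  induction rest generalizing rows with
  | nil => exact ⟨rfl, fun k _ => rfl, rfl⟩
  | cons p r ih =>
    have hnd2 : p.1 ∉ r.map Prod.fst ∧ (r.map Prod.fst).Nodup := by
      simp only [List.map_cons, List.nodup_cons] at hnd; exact hnd
    have hpr : p.1 ∉ r.map Prod.fst := hnd2.1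
    have hnd' : (r.map Prod.fst).Nodup := hnd2.2
    obtain ⟨ik, ip, iq, iother⟩ :=
      pvInner_fold p r rows hpr hnd' (hk p (by simp)) (fun q hq => hk q (by simp [hq]))
    set rows1 := r.foldl (pvInner p) rows with hrows1
    obtain ⟨ok, oother, ovals⟩ := ih rows1 hnd' (fun q hq => ik ▸ hk q (by simp [hq]))
    have houter : pvOuter rows (p :: r) = pvOuter rows1 r := rfl
    refine ⟨?_, ?_, ?_⟩
    · rw [houter, ok, ik]
    · intro k hkmem
      have hkmem' : k ≠ p.1 ∧ k ∉ r.map Prod.fst := by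
        simp only [List.map_cons, List.mem_cons, not_or] at hkmem; exact hkmem
      rw [houter, oother k hkmem'.2, iother k hkmem'.1 hkmem'.2]
    · simp only [List.map_cons, pvSpecVals, houter]
      rw [oother p.1 hpr, ip, ovals,
          pvSpecVals_congr _ _ r (fun q hq => by rw [iq q hq])]

-- the positional spec equals the full-scan row function
theorem pvSpecVals_eq_rows (rest pre : List (String × Int))
    (hnd : ((pre ++ rest).map Prod.fst).Nodup) :
    pvSpecVals (fun q => pre.foldl (pvApplyFrom q) pvEmptyRec) rest
      = rest.map (fun p => pvRowB p.1 p.2 (pre ++ rest)) := by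
  induction rest generalizing pre with
  | nil => rfl
  | cons p r ih =>
    have hnd2 := hnd
    rw [List.map_append, List.nodup_append] at hnd2
    have hppre : p.1 ∉ pre.map Prod.fst := fun hmem => hnd2.2.2 p.1 hmem p.1 (by simp) rfl
    have hpr : p.1 ∉ r.map Prod.fst := by
      have h3 := hnd2.2.1
      simp only [List.map_cons, List.nodup_cons] at h3
      exact h3.1
    simp only [pvSpecVals, List.map_cons]
    congr 1
    · -- head: pvRowB over pre ++ p :: r
      rw [pvRowB]
      rw [List.foldl_append, List.foldl_cons]
      have h1 : pre.foldl (pvStepB p.1 p.2) pvEmptyRec = pre.foldl (pvApplyFrom p) pvEmptyRec := by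
        apply PySem.List.foldl_congr_mem
        intro acc x hx
        have : p.1 ≠ x.1 := fun e => hppre (e ▸ List.mem_map_of_mem hx)
        simp [pvStepB, this]
      have h2 : pvStepB p.1 p.2 (pre.foldl (pvApplyFrom p) pvEmptyRec) p
          = pre.foldl (pvApplyFrom p) pvEmptyRec := by simp [pvStepB]
      have h3 : ∀ init : pvRec, r.foldl (pvStepB p.1 p.2) init = r.foldl (pvApplyFrom p) init := by
        intro init
        apply PySem.List.foldl_congr_mem
        intro acc x hx
        have : p.1 ≠ x.1 := fun e => hpr (e ▸ List.mem_map_of_mem hx)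
        simp [pvStepB, this]
      rw [h1, h2, h3]
    · -- tail: push p into pre
      have hfun : ∀ q ∈ r, pvApplyFrom q (pre.foldl (pvApplyFrom q) pvEmptyRec) p
          = (pre ++ [p]).foldl (pvApplyFrom q) pvEmptyRec := by
        intro q _; rw [List.foldl_append]; rfl
      rw [pvSpecVals_congr _ _ r hfun, ih (pre ++ [p]) (by simpa using hnd)]
      simp

-- pointwise second components equal + shared first component ⇒ the pair maps are equal
theorem pvMap_pair_eq {α β γ : Type} (l : List α) (nm : α → γ) (f g : α → β)
    (h : l.map f = l.map g) :
    l.map (fun x => (nm x, f x)) = l.map (fun x => (nm x, g x)) := by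
  induction l with
  | nil => rfl
  | cons x xs ih =>
    simp only [List.map_cons, List.cons.injEq] at h ⊢
    exact ⟨by rw [h.1], ih h.2⟩

-- the final rows dict, as a literal items list
theorem pvRows_items (pps : List (String × Int)) (hnd : (pps.map Prod.fst).Nodup) :
    (pvRows pps).items = pps.map (fun pp => (pp.1, pvRowB pp.1 pp.2 pps)) := by
  rw [pvRows]
  set rows0 := pps.foldl (fun d pp => d.insert pp.1 pvEmptyRec) PySem.Dict.empty with hrows0
  have hitems0 : rows0.items = pps.map (fun pp => (pp.1, pvEmptyRec)) := by
    rw [hrows0]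
    have := PySem.Dict.items_foldl_insert_fresh pps Prod.fst (fun _ => pvEmptyRec)
      PySem.Dict.empty (fun a _ => by simp [PySem.Dict.contains_empty]) hnd
    simpa [PySem.Dict.items] using this
  have hkeys0 : rows0.keys = pps.map Prod.fst := by
    simp [PySem.Dict.keys, hitems0, Function.comp]
  have hget0 : ∀ q ∈ pps, rows0.getD q.1 pvEmptyRec = pvEmptyRec := by
    intro q hq
    have hmem : (q.1, pvEmptyRec) ∈ rows0.items := by
      rw [hitems0]; exact List.mem_map_of_mem hq
    have hnd0 : rows0.keys.Nodup := by rw [hkeys0]; exact hnd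
    exact PySem.Dict.getD_of_mem_items rows0 hmem hnd0 pvEmptyRec
  obtain ⟨ok, _, ovals⟩ := pvOuter_spec pps rows0 hnd
    (fun q hq => by rw [hkeys0]; exact List.mem_map_of_mem hq)
  have hvals : pps.map (fun q => (pvOuter rows0 pps).getD q.1 pvEmptyRec)
      = pps.map (fun p => pvRowB p.1 p.2 pps) := by
    rw [ovals, pvSpecVals_congr _ (fun _ => pvEmptyRec) pps hget0]
    have := pvSpecVals_eq_rows pps [] (by simpa using hnd)
    simpa using this
  have hkeysR : (pvOuter rows0 pps).keys = pps.map Prod.fst := by rw [ok, hkeys0]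
  have hndR : (pvOuter rows0 pps).keys.Nodup := by rw [hkeysR]; exact hnd
  rw [PySem.Dict.items_eq_map_keys _ hndR pvEmptyRec, hkeysR, List.map_map]
  exact pvMap_pair_eq pps Prod.fst _ _ hvals

-- ===== VERDICT =====
theorem generate_friendship_rules_spec : Claim_equal_generate_friendship_rules := by
  intro pps _ hpre
  unfold Spec_generate_friendship_rules generate_friendship_rules generate_friendship_rules_alt
  rw [pvFoldA_eq_maps pps pps [] [] [], pvRows_items pps hpre]
  simp only [List.nil_append, List.map_map, List.cons.injEq, Prod.mk.injEq, true_and, and_true]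
  refine ⟨?_, ?_, ?_⟩ <;>
  · apply List.map_congr_left
    intro pp _
    rw [pvRow_emb]
    rcases h : pvRowB pp.1 pp.2 pps with ⟨be, en, fr, inf, ne⟩
    simp [h, pvEmb, pvRenderFive, Function.comp]
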